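-- pv_equiv track=rewrite | github.com/HappynessI/verl-for-AgentGym | examples/sglang_multiturn/my_exp/legacy/entropy_analysis/entropy_offline_minimax_traj.py | _find_prefix_boundary
-- ===== SOURCE A (Python) =====
-- from typing import Dict, List, Optional, Tuple, Any
--
-- def _find_prefix_boundary(prefix_ids: List[int], full_ids: List[int], max_trim: int = 8) -> Optional[int]:
--     """
--     在 full_ids 中找 prefix 边界。
--
--     注意：BPE 可能在拼接边界产生跨界 merge，导致 tokenize(prefix) 的尾部 token 与 tokenize(full) 不一致。
--     这里允许裁掉 prefix_ids 末尾最多 max_trim 个 token，以找到稳定的“前缀匹配”边界。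
--     返回 boundary（full_ids 中 target 追加段起点 index）。
--     """
--     if len(full_ids) == 0:
--         return None
--     if len(prefix_ids) == 0:
--         return 0
--
--     # 优先尝试完全匹配
--     if full_ids[: len(prefix_ids)] == prefix_ids:
--         return len(prefix_ids)
--
--     # 允许裁掉末尾 token 以抵消跨界 merge
--     trim_max = min(max_trim, len(prefix_ids))
--     for trim in range(1, trim_max + 1):
--         cand = prefix_ids[:-trim]
--         if len(cand) == 0:
--             return 0
--         if full_ids[: len(cand)] == cand:
--             return len(cand)
--     return None
-- ===== SOURCE B (Python) =====
-- from typing import List, Optional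
--
-- def _find_prefix_boundary(prefix_ids: List[int], full_ids: List[int], max_trim: int = 8) -> Optional[int]:
--     """One mismatch scan: the answer is the common-prefix length c of
--     prefix_ids and full_ids, provided trimming len(prefix_ids)-c tail
--     tokens is allowed (0 trims always allowed for the exact match)."""
--     if not full_ids:
--         return None
--     c = 0
--     m = min(len(prefix_ids), len(full_ids))
--     while c < m and prefix_ids[c] == full_ids[c]:
--         c += 1
--     if c == len(prefix_ids) or c >= len(prefix_ids) - max_trim:
--         return c
--     return None
-- ===== Notes on version B (the rewrite author's own statement) =====
-- stated objective: faster
-- what changed: Replaces the trim loop of repeated full-length slice comparisons with a single element-wise common-prefix scan that stops at the first mismatch, plus a closed-form decision (return c iff c == len(prefix) or c >= len(prefix)-max_trim).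
import Mathlib
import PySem

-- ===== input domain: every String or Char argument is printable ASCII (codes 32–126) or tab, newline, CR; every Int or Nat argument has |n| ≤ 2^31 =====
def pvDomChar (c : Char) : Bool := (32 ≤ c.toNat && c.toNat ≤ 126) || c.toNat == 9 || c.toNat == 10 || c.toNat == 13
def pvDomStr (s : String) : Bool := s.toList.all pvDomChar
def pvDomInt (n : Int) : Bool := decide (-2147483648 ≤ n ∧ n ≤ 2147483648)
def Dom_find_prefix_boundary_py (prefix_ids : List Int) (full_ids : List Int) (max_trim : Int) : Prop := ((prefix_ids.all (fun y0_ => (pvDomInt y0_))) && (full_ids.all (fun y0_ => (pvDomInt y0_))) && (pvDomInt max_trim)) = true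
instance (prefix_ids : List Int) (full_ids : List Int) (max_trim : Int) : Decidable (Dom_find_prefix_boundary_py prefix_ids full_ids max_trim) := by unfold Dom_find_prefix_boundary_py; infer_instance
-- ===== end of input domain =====

-- B replaces A's trim loop of repeated slice comparisons by one common-prefix
-- scan and a closed-form decision (objective: simpler).

-- ===== PORT A =====
-- the 'for trim in range(1, trim_max + 1)' loop with its early returns
def pvLoopA (prefix_ids full_ids : List Int) : List Int → Option Int
  | [] => none
  | trim :: rest =>
      let cand := PySem.List.slice prefix_ids none (some (-trim))
      if cand.length = 0 then some 0
      else if PySem.List.slice full_ids none (some (cand.length : Int)) = cand then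
        some (cand.length : Int)
      else pvLoopA prefix_ids full_ids rest

def find_prefix_boundary_py (prefix_ids : List Int) (full_ids : List Int) (max_trim : Int) : Option Int :=
  if full_ids.length = 0 then none
  else if prefix_ids.length = 0 then some 0
  else if PySem.List.slice full_ids none (some (prefix_ids.length : Int)) = prefix_ids then
    some (prefix_ids.length : Int)
  else
    let trim_max := min max_trim (prefix_ids.length : Int)
    pvLoopA prefix_ids full_ids (PySem.List.pyRange 1 (trim_max + 1) 1)

-- ===== PORT B =====
-- the 'while c < m and prefix_ids[c] == full_ids[c]: c += 1' mismatch scan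
def pvCommonLen : List Int → List Int → Nat
  | a :: as, b :: bs => if a = b then pvCommonLen as bs + 1 else 0
  | _, _ => 0

def find_prefix_boundary_py_alt (prefix_ids : List Int) (full_ids : List Int) (max_trim : Int) : Option Int :=
  if full_ids = [] then none
  else
    let c : Int := pvCommonLen prefix_ids full_ids
    if c = (prefix_ids.length : Int) ∨ (prefix_ids.length : Int) - max_trim ≤ c then some c
    else none

-- ===== PRECONDITION & SPEC =====
def Spec_find_prefix_boundary_py (prefix_ids : List Int) (full_ids : List Int) (max_trim : Int) (out : Option Int) : Prop := out = find_prefix_boundary_py_alt prefix_ids full_ids max_trim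
instance (prefix_ids : List Int) (full_ids : List Int) (max_trim : Int) (out : Option Int) : Decidable (Spec_find_prefix_boundary_py prefix_ids full_ids max_trim out) := by unfold Spec_find_prefix_boundary_py; infer_instance

-- ===== CLAIM (what is proved, stated in full; the proofs are below) =====
def Claim_equal_find_prefix_boundary_py : Prop := ∀ (prefix_ids : List Int) (full_ids : List Int) (max_trim : Int), Dom_find_prefix_boundary_py prefix_ids full_ids max_trim → Spec_find_prefix_boundary_py prefix_ids full_ids max_trim (find_prefix_boundary_py prefix_ids full_ids max_trim)

-- ===== LEMMAS AND PROOFS =====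

lemma pvLoopA_cons (p f : List Int) (trim : Int) (rest : List Int) :
    pvLoopA p f (trim :: rest) =
      (if (PySem.List.slice p none (some (-trim))).length = 0 then some 0
       else if PySem.List.slice f none (some (((PySem.List.slice p none (some (-trim))).length : Nat) : Int))
               = PySem.List.slice p none (some (-trim)) then
         some (((PySem.List.slice p none (some (-trim))).length : Nat) : Int)
       else pvLoopA p f rest) := rfl

lemma pvCommonLen_le_left (p f : List Int) : pvCommonLen p f ≤ p.length := by
  induction p generalizing f with
  | nil => simp [pvCommonLen]
  | cons a as ih =>
    cases f with
    | nil => simp [pvCommonLen]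
    | cons b bs =>
      simp only [pvCommonLen, List.length_cons]
      split_ifs with h
      · exact Nat.succ_le_succ (ih bs)
      · omega

lemma pvCommonLen_le_right (p f : List Int) : pvCommonLen p f ≤ f.length := by
  induction p generalizing f with
  | nil => simp [pvCommonLen]
  | cons a as ih =>
    cases f with
    | nil => simp [pvCommonLen]
    | cons b bs =>
      simp only [pvCommonLen, List.length_cons]
      split_ifs with h
      · exact Nat.succ_le_succ (ih bs)
      · omega

-- the common-prefix scan characterises every slice comparison A makes
lemma take_eq_take_iff (p : List Int) : ∀ (f : List Int) (k : Nat), k ≤ p.length →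
    (f.take k = p.take k ↔ k ≤ pvCommonLen p f) := by
  induction p with
  | nil =>
    intro f k hk
    have hk0 : k = 0 := by simpa using hk
    subst hk0; simp
  | cons a as ih =>
    intro f k hk
    cases k with
    | zero => simp
    | succ k =>
      cases f with
      | nil =>
        simp only [List.take_nil, List.take_succ_cons, pvCommonLen]
        constructor
        · intro h; exact absurd h (by simp)
        · omega
      | cons b bs =>
        simp only [List.take_succ_cons, List.cons.injEq, pvCommonLen]
        by_cases hab : a = b
        · subst hab
          rw [if_pos rfl]
          have hiff := ih bs k (by simpa using hk)
          constructor
          · rintro ⟨-, h2⟩; have := hiff.mp h2; omega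
          · intro h; exact ⟨rfl, hiff.mpr (by omega)⟩
        · rw [if_neg hab]
          constructor
          · rintro ⟨h1, -⟩; exact absurd h1.symm hab
          · omega

lemma loop_aux (p f : List Int) (hc : pvCommonLen p f < p.length) :
    ∀ (m : Nat) (s : Int), 1 ≤ s → s ≤ (p.length : Int) - (pvCommonLen p f : Int) →
    pvLoopA p f ((List.range m).map (fun k : Nat => s + (k : Int))) =
      (if (p.length : Int) - (pvCommonLen p f : Int) < s + (m : Int) then
         some ((pvCommonLen p f : Int)) else none) := by
  intro m
  induction m with
  | zero =>
    intro s hs hsD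
    rw [List.range_zero, List.map_nil]
    show (none : Option Int) = _
    rw [if_neg (by push_cast; omega)]
  | succ m ih =>
    intro s hs hsD
    have hrange : (List.range (m + 1)).map (fun k : Nat => s + (k : Int)) =
        s :: (List.range m).map (fun k : Nat => (s + 1) + (k : Int)) := by
      rw [List.range_succ_eq_map, List.map_cons, List.map_map]
      refine congrArg₂ _ (by simp) ?_
      apply List.map_congr_left
      intro k _
      simp only [Function.comp_apply]
      push_cast; ring
    have hcand : PySem.List.slice p none (some (-s)) = p.take (p.length - s.toNat) := by
      have h1 : -s = -((s.toNat : Nat) : Int) := by omega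
      rw [h1, PySem.List.slice_to_neg_natCast p s.toNat (by omega)]
    have hstn : s.toNat ≤ p.length := by omega
    have hclen : (p.take (p.length - s.toNat)).length = p.length - s.toNat := by
      rw [List.length_take]; omega
    rw [hrange, pvLoopA_cons, hcand, hclen]
    by_cases hD : s = (p.length : Int) - (pvCommonLen p f : Int)
    · have hst : s.toNat = p.length - pvCommonLen p f := by omega
      have htk : p.length - s.toNat = pvCommonLen p f := by omega
      by_cases hc0 : pvCommonLen p f = 0
      · rw [if_pos (by omega)]
        rw [if_pos (by push_cast; omega)]
        simp [hc0]
      · rw [if_neg (by omega)]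
        rw [htk, PySem.List.slice_to_natCast]
        rw [if_pos ((take_eq_take_iff p f (pvCommonLen p f) (by omega)).mpr le_rfl)]
        rw [if_pos (by push_cast; omega)]
    · have hslt : s < (p.length : Int) - (pvCommonLen p f : Int) := by omega
      rw [if_neg (by omega)]
      have hnomatch : PySem.List.slice f none (some ((p.length - s.toNat : Nat) : Int))
          ≠ p.take (p.length - s.toNat) := by
        rw [PySem.List.slice_to_natCast]
        intro h
        have := (take_eq_take_iff p f (p.length - s.toNat) (by omega)).mp h
        omega
      rw [if_neg hnomatch]
      rw [ih (s + 1) (by omega) (by omega)]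
      split_ifs with h1 h2 <;> first | rfl | (exfalso; push_cast at *; omega)

-- ===== VERDICT (by name: the statement is the Claim_ definition above) =====
theorem find_prefix_boundary_py_spec : Claim_equal_find_prefix_boundary_py := by
  intro p f t _
  unfold Spec_find_prefix_boundary_py find_prefix_boundary_py find_prefix_boundary_py_alt
  have hcl := pvCommonLen_le_left p f
  have hcr := pvCommonLen_le_right p f
  by_cases hf : f = []
  · subst hf; simp
  · rw [if_neg (by simpa using hf), if_neg hf]
    by_cases hp : p.length = 0
    · have hpnil : p = [] := List.length_eq_zero_iff.mp hp
      subst hpnil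
      simp [pvCommonLen]
    · rw [if_neg hp, PySem.List.slice_to_natCast]
      by_cases hx : f.take p.length = p
      · have hc : pvCommonLen p f = p.length := by
          have := (take_eq_take_iff p f p.length le_rfl).mp (by rw [hx, List.take_length])
          omega
        rw [if_pos hx]
        show some ((p.length : Nat) : Int) =
          if (pvCommonLen p f : Int) = (p.length : Int) ∨
              (p.length : Int) - t ≤ (pvCommonLen p f : Int) then
            some ((pvCommonLen p f : Int)) else none
        rw [if_pos (Or.inl (by exact_mod_cast hc)), hc]
      · have hc : pvCommonLen p f < p.length := by
          rcases Nat.lt_or_ge (pvCommonLen p f) p.length with h | h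
          · exact h
          · exact absurd (by
              have h2 := (take_eq_take_iff p f p.length le_rfl).mpr (by omega)
              rwa [List.take_length] at h2) hx
        rw [if_neg hx]
        show pvLoopA p f (PySem.List.pyRange 1 (min t (p.length : Int) + 1) 1) =
          if (pvCommonLen p f : Int) = (p.length : Int) ∨
              (p.length : Int) - t ≤ (pvCommonLen p f : Int) then
            some ((pvCommonLen p f : Int)) else none
        rw [PySem.List.pyRange_one, loop_aux p f hc ((min t (p.length : Int) + 1 - 1)).toNat 1 le_rfl (by omega)]
        have hcn : ¬ ((pvCommonLen p f : Int) = (p.length : Int)) := by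
          intro h; exact absurd (by exact_mod_cast h) (by omega)
        split_ifs with h1 h2 <;> first | rfl | (exfalso; omega)
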